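-- pv_equiv track=rewrite | github.com/oornnery/tiny-sip | tinysip/media/codecs.py | linear2alaw
-- ===== SOURCE A (Python) =====
-- def linear2alaw(sample: int) -> int:
--     """Converte PCM16 (signed) em PCMA 8-bit."""
--     if sample > 32767:
--         sample = 32767
--     if sample < -32768:
--         sample = -32768
--     sign = 0x00
--     if sample < 0:
--         sample = -sample
--         sign = 0x80
--     if sample > 32635:
--         sample = 32635
--     if sample >= 2048:
--         seg = 7
--         for i in range(7):
--             if sample <= (0x20 << i) * 16 - 1:
--                 seg = i
--                 break
--         mant = (sample >> (seg + 3)) & 0x0F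
--         alaw = (seg << 4) | mant
--     else:
--         alaw = (sample >> 4) & 0x0F
--     alaw ^= sign ^ 0x55
--     return alaw & 0xFF
-- ===== SOURCE B (Python) =====
-- def linear2alaw(sample: int) -> int:
--     """Converte PCM16 (signed) em PCMA 8-bit."""
--     sample = max(-32768, min(32767, sample))
--     sign = 0x80 if sample < 0 else 0x00
--     mag = min(abs(sample), 32635)
--     if mag >= 2048:
--         seg = mag.bit_length() - 9
--         alaw = (seg << 4) | ((mag >> (seg + 3)) & 0x0F)
--     else:
--         alaw = (mag >> 4) & 0x0F
--     return (alaw ^ sign ^ 0x55) & 0xFF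
-- ===== Notes on version B (the rewrite author's own statement) =====
-- stated objective: simpler
-- what changed: Replaces A's sequential if-chain clamping and linear range(7) search for the A-law segment with min/max/abs clamping and a closed-form segment computed from the magnitude's bit length.
import Mathlib
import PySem

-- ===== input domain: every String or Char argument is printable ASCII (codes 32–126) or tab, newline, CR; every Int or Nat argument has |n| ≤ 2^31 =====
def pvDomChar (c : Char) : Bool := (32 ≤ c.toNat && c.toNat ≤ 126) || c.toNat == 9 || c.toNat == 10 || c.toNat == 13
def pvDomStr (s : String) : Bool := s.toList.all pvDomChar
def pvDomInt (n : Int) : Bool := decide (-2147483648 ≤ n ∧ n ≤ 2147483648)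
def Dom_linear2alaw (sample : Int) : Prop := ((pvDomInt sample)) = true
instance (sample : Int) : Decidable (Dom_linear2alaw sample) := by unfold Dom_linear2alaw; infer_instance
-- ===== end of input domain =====

-- B replaces A's linear segment-search loop by a closed-form segment from the magnitude's
-- bit length (objective: simpler).

-- ===== PORT A =====
-- the 'for i in range(7): if sample <= (0x20 << i)*16 - 1: seg = i; break' loop, seg = 7 if no break
def pvSegLoop (sample : Int) : List Int → Int
  | [] => 7
  | i :: rest =>
      if sample ≤ ((0x20 : Int) <<< i.toNat) * 16 - 1 then i else pvSegLoop sample rest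

def linear2alaw (sample : Int) : Int :=
  let sample := if sample > 32767 then (32767 : Int) else sample
  let sample := if sample < -32768 then (-32768 : Int) else sample
  let sign : Int := if sample < 0 then 0x80 else 0x00
  let sample := if sample < 0 then -sample else sample
  let sample := if sample > 32635 then 32635 else sample
  let alaw : Int :=
    if sample ≥ 2048 then
      let seg := pvSegLoop sample (PySem.List.pyRange 0 7 1)
      let mant := PySem.Int.band (sample >>> (seg + 3).toNat) 0x0F
      PySem.Int.bor (seg <<< (4:Nat)) mant
    else
      PySem.Int.band (sample >>> 4) 0x0F
  PySem.Int.band (PySem.Int.bxor alaw (PySem.Int.bxor sign 0x55)) 0xFF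

-- ===== PORT B =====
def linear2alaw_alt (sample : Int) : Int :=
  let sample := max (-32768) (min 32767 sample)
  let sign : Int := if sample < 0 then 0x80 else 0x00
  let mag := min |sample| 32635
  let alaw : Int :=
    if mag ≥ 2048 then
      let seg : Int := (PySem.Int.bitLength mag : Int) - 9
      PySem.Int.bor (seg <<< (4:Nat)) (PySem.Int.band (mag >>> (seg + 3).toNat) 0x0F)
    else
      PySem.Int.band (mag >>> 4) 0x0F
  PySem.Int.band (PySem.Int.bxor (PySem.Int.bxor alaw sign) 0x55) 0xFF

-- ===== PRECONDITION & SPEC =====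
def Spec_linear2alaw (sample : Int) (out : Int) : Prop := out = linear2alaw_alt sample
instance (sample : Int) (out : Int) : Decidable (Spec_linear2alaw sample out) := by unfold Spec_linear2alaw; infer_instance

-- ===== CLAIM (what is proved, stated in full; the proofs are below) =====
def Claim_equal_linear2alaw : Prop := ∀ (sample : Int), Dom_linear2alaw sample → Spec_linear2alaw sample (linear2alaw sample)

-- ===== LEMMAS AND PROOFS =====

-- final step: (alaw ^ (sign ^ 0x55)) & 0xFF = ((alaw ^ sign) ^ 0x55) & 0xFF
lemma pv_xor_regroup (a s : Int) (ha : 0 ≤ a) (hs : s = 0 ∨ s = 128) :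
    PySem.Int.band (PySem.Int.bxor a (PySem.Int.bxor s 85)) 255
      = PySem.Int.band (PySem.Int.bxor (PySem.Int.bxor a s) 85) 255 := by
  rcases hs with rfl | rfl
  · rw [show PySem.Int.bxor (0:Int) 85 = 85 from by decide, PySem.Int.bxor_zero]
  · rw [show PySem.Int.bxor (128:Int) 85 = 213 from by decide,
        PySem.Int.bxor_of_nonneg ha (by norm_num),
        PySem.Int.bxor_of_nonneg ha (by norm_num),
        PySem.Int.bxor_of_nonneg (by positivity) (by norm_num),
        PySem.Int.band_of_nonneg (by positivity) (by norm_num),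
        PySem.Int.band_of_nonneg (by positivity) (by norm_num)]
    simp only [Int.toNat_natCast]
    rw [show Int.toNat 213 = Int.toNat 128 ^^^ Int.toNat 85 from by decide, Nat.xor_assoc]

lemma pv_bitLength_eq (m : Int) (k : Nat) (h1 : (2:Int) ^ k ≤ m) (h2 : m < 2 ^ (k+1)) :
    PySem.Int.bitLength m = k + 1 := by
  have hm0 : 0 < m := lt_of_lt_of_le (by positivity) h1
  have hcast : (m.natAbs : Int) = m := Int.natAbs_of_nonneg hm0.le
  have ha1 : 2 ^ k ≤ m.natAbs := by
    have := h1; rw [← hcast] at this; exact_mod_cast this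
  have ha2 : m.natAbs < 2 ^ (k+1) := by
    have := h2; rw [← hcast] at this; exact_mod_cast this
  have hu := PySem.Int.lt_two_pow_bitLength m
  have hl := PySem.Int.two_pow_bitLength_le m (by omega)
  have hk1 : k < PySem.Int.bitLength m := by
    by_contra h
    exact absurd (lt_of_le_of_lt ha1 hu) (not_lt.mpr (Nat.pow_le_pow_right (by norm_num) (by omega)))
  have hk2 : PySem.Int.bitLength m - 1 < k + 1 := by
    by_contra h
    exact absurd (lt_of_le_of_lt hl ha2) (not_lt.mpr (Nat.pow_le_pow_right (by norm_num) (by omega)))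
  omega

-- the loop's segment agrees with bit_length - 9 on every capped magnitude
lemma pv_seg_eq (m : Int) (h1 : 2048 ≤ m) (h2 : m ≤ 32635) :
    pvSegLoop m (PySem.List.pyRange 0 7 1) = (PySem.Int.bitLength m : Int) - 9 := by
  rw [show PySem.List.pyRange 0 7 1 = [0,1,2,3,4,5,6] from by decide]
  simp only [pvSegLoop]
  norm_num [Int.shiftLeft_eq, show Int.toNat (0:Int) = 0 from rfl, show Int.toNat (1:Int) = 1 from rfl,
    show Int.toNat (2:Int) = 2 from rfl, show Int.toNat (3:Int) = 3 from rfl,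
    show Int.toNat (4:Int) = 4 from rfl, show Int.toNat (5:Int) = 5 from rfl,
    show Int.toNat (6:Int) = 6 from rfl]
  rcases lt_or_ge m 4096 with h | h
  · rw [pv_bitLength_eq m 11 (by norm_num; omega) (by norm_num; omega)]
    split_ifs <;> omega
  rcases lt_or_ge m 8192 with h' | h'
  · rw [pv_bitLength_eq m 12 (by norm_num; omega) (by norm_num; omega)]
    split_ifs <;> omega
  rcases lt_or_ge m 16384 with h'' | h''
  · rw [pv_bitLength_eq m 13 (by norm_num; omega) (by norm_num; omega)]
    split_ifs <;> omega
  · rw [pv_bitLength_eq m 14 (by norm_num; omega) (by norm_num; omega)]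
    split_ifs <;> omega

lemma pv_band15_nonneg (x : Int) : 0 ≤ PySem.Int.band x 15 := by
  rw [PySem.Int.band_comm]
  exact PySem.Int.band_nonneg_of_nonneg_left x (by norm_num)

-- nonnegativity helpers for the alaw byte
lemma pv_shl4_nonneg (x : Int) (hx : 0 ≤ x) : 0 ≤ x <<< (4:Nat) := by
  rw [Int.shiftLeft_eq]; positivity

lemma pv_bor_nonneg (a b : Int) (ha : 0 ≤ a) (hb : 0 ≤ b) : 0 ≤ PySem.Int.bor a b := by
  rw [PySem.Int.bor_of_nonneg ha hb]; positivity

-- the byte built from magnitude and sign agrees between the two branch shapes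
lemma pv_core_eq (mag sign : Int) (h0 : 0 ≤ mag) (h1 : mag ≤ 32635)
    (hs : sign = 0 ∨ sign = 128) :
    PySem.Int.band (PySem.Int.bxor
      (if mag ≥ 2048 then
        PySem.Int.bor (pvSegLoop mag (PySem.List.pyRange 0 7 1) <<< (4:Nat))
          (PySem.Int.band (mag >>> (pvSegLoop mag (PySem.List.pyRange 0 7 1) + 3).toNat) 15)
       else PySem.Int.band (mag >>> 4) 15)
      (PySem.Int.bxor sign 85)) 255
    = PySem.Int.band (PySem.Int.bxor (PySem.Int.bxor
      (if mag ≥ 2048 then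
        PySem.Int.bor (((PySem.Int.bitLength mag : Int) - 9) <<< (4:Nat))
          (PySem.Int.band (mag >>> (((PySem.Int.bitLength mag : Int) - 9) + 3).toNat) 15)
       else PySem.Int.band (mag >>> 4) 15)
      sign) 85) 255 := by
  have hbr : (if mag ≥ 2048 then
        PySem.Int.bor (((PySem.Int.bitLength mag : Int) - 9) <<< (4:Nat))
          (PySem.Int.band (mag >>> (((PySem.Int.bitLength mag : Int) - 9) + 3).toNat) 15)
       else PySem.Int.band (mag >>> 4) 15)
      = (if mag ≥ 2048 then
        PySem.Int.bor (pvSegLoop mag (PySem.List.pyRange 0 7 1) <<< (4:Nat))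
          (PySem.Int.band (mag >>> (pvSegLoop mag (PySem.List.pyRange 0 7 1) + 3).toNat) 15)
       else PySem.Int.band (mag >>> 4) 15) := by
    split_ifs with h
    · rw [pv_seg_eq mag h h1]
    · rfl
  rw [hbr]
  apply pv_xor_regroup _ _ _ hs
  split_ifs with h
  · apply pv_bor_nonneg _ _ _ (pv_band15_nonneg _)
    apply pv_shl4_nonneg
    rw [pv_seg_eq mag h h1]
    have h2048 : 2048 ≤ mag.natAbs := by omega
    have hu := PySem.Int.lt_two_pow_bitLength mag
    have h11 : 11 < PySem.Int.bitLength mag := by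
      have := lt_of_le_of_lt h2048 hu
      have := (Nat.pow_lt_pow_iff_right (a := 2) (by norm_num)).mp
        (lt_of_le_of_lt (show 2 ^ 11 ≤ 2048 by norm_num) this)
      omega
    omega
  · exact pv_band15_nonneg _

-- ===== VERDICT (by name: the statement is the Claim_ definition above) =====
theorem linear2alaw_spec : Claim_equal_linear2alaw := by
  intro s _
  unfold Spec_linear2alaw
  simp only [linear2alaw, linear2alaw_alt]
  rw [show (if (if s > 32767 then (32767:Int) else s) < -32768 then (-32768:Int)
        else if s > 32767 then (32767:Int) else s) = max (-32768) (min 32767 s) from by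
      simp only [max_def, min_def]; split_ifs <;> omega]
  generalize max (-32768) (min 32767 s) = c
  rw [show |c| = (if c < 0 then -c else c) from by
      rcases lt_or_ge c 0 with h | h
      · simp [abs_of_neg h, h]
      · simp [abs_of_nonneg h, not_lt.mpr h]]
  rw [show min (if c < 0 then -c else c) 32635
        = (if (if c < 0 then -c else c) > 32635 then 32635 else (if c < 0 then -c else c)) from by
      simp only [min_def]; split_ifs <;> omega]
  generalize hm : (if (if c < 0 then -c else c) > 32635 then (32635:Int)
      else (if c < 0 then -c else c)) = mag
  have h0 : 0 ≤ mag ∧ mag ≤ 32635 := by split_ifs at hm <;> omega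
  exact pv_core_eq mag _ h0.1 h0.2 (by split_ifs <;> simp)
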